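-- pv_equiv track=rewrite | github.com/Omerd05/cryptopals | Set2/sol.py | detectIndicatorIndex
-- ===== SOURCE A (Python) =====
-- import math
--
-- def detectIndicatorIndex(ciphertext):
--     cur_blocks = set()
--     indicator_idx = -1
--     for i in range(math.ceil(len(ciphertext)/16)):
--         if ciphertext[16*i:16*(i+1)] in cur_blocks:
--             indicator_idx = i
--         else:
--             cur_blocks.add(ciphertext[16*i:16*(i+1)])
--
--     return indicator_idx
-- ===== SOURCE B (Python) =====
-- import math
--
-- def detectIndicatorIndex(ciphertext):
--     nblocks = math.ceil(len(ciphertext) / 16)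
--     blocks = [ciphertext[16*i:16*(i+1)] for i in range(nblocks)]
--     first = {}
--     for i, b in enumerate(blocks):
--         if b not in first:
--             first[b] = i
--     for i in range(nblocks - 1, -1, -1):
--         if first.get(blocks[i], i) < i:
--             return i
--     return -1
-- ===== Notes on version B (the rewrite author's own statement) =====
-- stated objective: alternative
-- what changed: Replaces the forward pass that maintains a seen-set and a last-duplicate accumulator by precomputing each block's first-occurrence index in a dict and scanning the block list backward, returning the first (largest) index whose first occurrence is earlier.
import Mathlib
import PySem

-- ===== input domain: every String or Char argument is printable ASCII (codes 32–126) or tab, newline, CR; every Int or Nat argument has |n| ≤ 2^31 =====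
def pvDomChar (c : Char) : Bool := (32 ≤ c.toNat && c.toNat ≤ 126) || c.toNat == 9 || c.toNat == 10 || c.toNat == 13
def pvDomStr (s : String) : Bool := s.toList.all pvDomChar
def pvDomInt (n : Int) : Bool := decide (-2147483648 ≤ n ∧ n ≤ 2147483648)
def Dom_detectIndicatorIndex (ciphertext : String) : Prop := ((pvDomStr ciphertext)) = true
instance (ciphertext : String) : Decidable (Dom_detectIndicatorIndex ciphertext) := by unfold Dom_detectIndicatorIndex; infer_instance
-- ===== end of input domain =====

-- B replaces A's forward seen-set pass by building the block list and scanning backward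
-- for the first block repeated among its predecessors (alternative decomposition, same results).

-- ===== PORT A =====
-- math.ceil(len(ciphertext)/16) — exact as ceiling division -((-len)//16) for these sizes
def detectIndicatorIndex (ciphertext : String) : Int :=
  let n : Int := -(PySem.Int.floordiv (-(PySem.Str.len ciphertext)) 16)
  let r := (PySem.List.pyRange 0 n 1).foldl
    (fun (st : PySem.Set String × Int) i =>
      let blk := PySem.Str.slice ciphertext (some (16*i)) (some (16*(i+1)))
      if PySem.Set.contains st.1 blk then (st.1, i) else (PySem.Set.add st.1 blk, st.2))
    (PySem.Set.empty, -1)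
  r.2

-- ===== PORT B =====
-- dict of first-occurrence indices: for i, b in enumerate(blocks): if b not in first: first[b] = i
def pvBuildFirst (blocks : List String) : PySem.Dict String Int :=
  (PySem.List.enumerate blocks 0).foldl
    (fun d p => if PySem.Dict.contains d p.2 then d else PySem.Dict.insert d p.2 p.1)
    PySem.Dict.empty

-- the descending loop 'for i in range(nblocks-1, -1, -1)' with early return, as a countdown recursion
def pvBScan (blocks : List String) (first : PySem.Dict String Int) : Nat → Int
  | 0 => -1
  | k+1 =>
    if PySem.Dict.getD first (PySem.List.pyGetD blocks (k : Int) "") (k : Int) < (k : Int) then (k : Int)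
    else pvBScan blocks first k

def detectIndicatorIndex_alt (ciphertext : String) : Int :=
  let nblocks : Int := -(PySem.Int.floordiv (-(PySem.Str.len ciphertext)) 16)
  let blocks := (PySem.List.pyRange 0 nblocks 1).map
    (fun i => PySem.Str.slice ciphertext (some (16*i)) (some (16*(i+1))))
  pvBScan blocks (pvBuildFirst blocks) nblocks.toNat

-- ===== PRECONDITION & SPEC =====
def Spec_detectIndicatorIndex (ciphertext : String) (out : Int) : Prop := out = detectIndicatorIndex_alt ciphertext
instance (ciphertext : String) (out : Int) : Decidable (Spec_detectIndicatorIndex ciphertext out) := by unfold Spec_detectIndicatorIndex; infer_instance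

-- ===== CLAIM (what is proved, stated in full; the proofs are below) =====
def Claim_equal_detectIndicatorIndex : Prop := ∀ (ciphertext : String), Dom_detectIndicatorIndex ciphertext → Spec_detectIndicatorIndex ciphertext (detectIndicatorIndex ciphertext)

-- ===== LEMMAS AND PROOFS =====

-- index-level reference scan: pvBScanF f k = largest j < k whose block repeats an earlier one, else -1
def pvBScanF (f : Nat → String) : Nat → Int
  | 0 => -1
  | k+1 => if ((List.range k).map f).contains (f k) then (k : Int) else pvBScanF f k

theorem pvBScanF_stable (f : Nat → String) (k : Nat)
    (h : ((List.range k).map f).contains (f k) = false) :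
    pvBScanF f (k+1) = pvBScanF f k := by
  simp only [pvBScanF, h, Bool.false_eq_true, if_false]

theorem pvFoldA_spec (f : Nat → String) (N : Nat) :
    (∀ x, x ∈ ((List.range N).foldl
        (fun (st : PySem.Set String × Int) k =>
          if PySem.Set.contains st.1 (f k) then (st.1, (k : Int))
          else (PySem.Set.add st.1 (f k), st.2))
        (PySem.Set.empty, -1)).1 ↔ x ∈ (List.range N).map f) ∧
    ((List.range N).foldl
        (fun (st : PySem.Set String × Int) k =>
          if PySem.Set.contains st.1 (f k) then (st.1, (k : Int))
          else (PySem.Set.add st.1 (f k), st.2))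
        (PySem.Set.empty, -1)).2 = pvBScanF f N := by
  induction N with
  | zero => simp [pvBScanF, PySem.Set.empty]
  | succ N ih =>
    rw [List.range_succ, List.foldl_append]
    set r := (List.range N).foldl
        (fun (st : PySem.Set String × Int) k =>
          if PySem.Set.contains st.1 (f k) then (st.1, (k : Int))
          else (PySem.Set.add st.1 (f k), st.2))
        (PySem.Set.empty, -1) with hr
    obtain ⟨hmem, hacc⟩ := ih
    have hc : PySem.Set.contains r.1 (f N) = ((List.range N).map f).contains (f N) := by
      rw [Bool.eq_iff_iff]
      simp only [PySem.Set.contains, List.contains_iff_mem]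
      exact hmem (f N)
    by_cases h : ((List.range N).map f).contains (f N) = true
    · have hfN : f N ∈ (List.range N).map f := List.contains_iff_mem.mp h
      simp only [List.foldl_cons, List.foldl_nil, hc, h, if_true]
      constructor
      · intro x
        rw [hmem x, List.map_append]
        simp only [List.map_cons, List.map_nil, List.mem_append, List.mem_singleton]
        exact ⟨Or.inl, fun hx => hx.elim id (fun he => he ▸ hfN)⟩
      · simp only [pvBScanF, h, if_true]
    · simp only [Bool.not_eq_true] at h
      simp only [List.foldl_cons, List.foldl_nil, hc, h, Bool.false_eq_true, if_false]
      constructor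
      · intro x
        rw [PySem.Set.mem_add r.1 (f N) x, hmem x, List.map_append]
        simp only [List.map_cons, List.map_nil, List.mem_append, List.mem_singleton]
      · rw [hacc, pvBScanF_stable f N h]

theorem pvGet?_buildFirst (bs : List String) (key : String) :
    PySem.Dict.get? (pvBuildFirst bs) key
      = (bs.findIdx? (fun b => b == key)).map Int.ofNat := by
  induction bs using List.reverseRecOn generalizing key with
  | nil => simp [pvBuildFirst, PySem.List.enumerate, PySem.Dict.get?_empty]
  | append_singleton bs b ih =>
    rw [pvBuildFirst, PySem.List.enumerate_append, List.foldl_append]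
    have hsing : PySem.List.enumerate [b] (0 + (bs.length : Int)) = [(0 + (bs.length : Int), b)] := by
      simp [PySem.List.enumerate]
    rw [hsing, List.foldl_cons, List.foldl_nil]
    have hd : (PySem.List.enumerate bs 0).foldl
        (fun d p => if PySem.Dict.contains d p.2 then d else PySem.Dict.insert d p.2 p.1)
        PySem.Dict.empty = pvBuildFirst bs := rfl
    rw [hd]
    dsimp only
    have hcontains : PySem.Dict.contains (pvBuildFirst bs) b
        = (bs.findIdx? (fun x => x == b)).isSome := by
      rw [PySem.Dict.contains_eq_isSome_get?, ih b, Option.isSome_map]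
    rw [List.findIdx?_append]
    by_cases hb : (bs.findIdx? (fun x => x == b)).isSome = true
    · -- b already seen: dict unchanged
      rw [hcontains, if_pos hb, ih key]
      by_cases hkey : (bs.findIdx? (fun x => x == key)).isSome = true
      · obtain ⟨j, hj⟩ := Option.isSome_iff_exists.mp hkey
        rw [hj]; simp
      · rw [Option.not_isSome_iff_eq_none] at hkey
        rw [hkey]
        simp only [Option.map_none, Option.none_or]
        by_cases hbk : (b == key) = true
        · -- key = b, but b ∈ bs contradicts findIdx? key = none
          obtain ⟨j, hj⟩ := Option.isSome_iff_exists.mp hb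
          have hall := List.findIdx?_eq_none_iff.mp hkey
          exfalso
          obtain ⟨x, hx, hpx⟩ : ∃ x ∈ bs, (x == b) = true := by
            rcases List.findIdx?_eq_some_iff_getElem.mp hj with ⟨h1, h2, -⟩
            exact ⟨bs[j], List.getElem_mem _, h2⟩
          have hxk : (x == key) = false := hall x hx
          rw [eq_of_beq hpx, hbk] at hxk
          cases hxk
        · simp only [Bool.not_eq_true] at hbk
          simp [List.findIdx?_cons, hbk]
    · -- b new: inserted at index bs.length
      rw [hcontains, if_neg (by simp [hb]), PySem.Dict.get?_insert]
      rw [Option.not_isSome_iff_eq_none] at hb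
      by_cases hbk : key = b
      · subst hbk
        have hbn : (bs.findIdx? (fun x => x == key)) = none := hb
        rw [if_pos rfl, hbn]
        simp [List.findIdx?_cons]
      · rw [if_neg hbk, ih key]
        have hbkb : (b == key) = false := by
          cases h : b == key
          · rfl
          · exact absurd (eq_of_beq h).symm hbk
        simp [List.findIdx?_cons, hbkb]

theorem pvCond_iff (f : Nat → String) (N k : Nat) (hk : k < N) :
    (PySem.Dict.getD (pvBuildFirst ((List.range N).map f)) (f k) (k : Int) < (k : Int))
      ↔ ((List.range k).map f).contains (f k) = true := by
  have hsplit : (List.range N).map f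
      = (List.range k).map f ++ (List.map (fun x => k + x) (List.range (N - k))).map f := by
    rw [← List.map_append, ← List.range_add, Nat.add_sub_cancel' (le_of_lt hk)]
  rw [PySem.Dict.getD_eq_get?_getD, pvGet?_buildFirst, hsplit, List.findIdx?_append]
  by_cases h : f k ∈ (List.range k).map f
  · -- found in the prefix, at an index j < k
    have hne : (((List.range k).map f).findIdx? (fun b => b == f k)) ≠ none := by
      intro hnone
      have := List.findIdx?_eq_none_iff.mp hnone (f k) h
      rw [beq_self_eq_true] at this; cases this
    obtain ⟨j, hj⟩ := Option.ne_none_iff_exists'.mp hne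
    obtain ⟨hjlt, -⟩ := List.findIdx?_eq_some_iff_findIdx_eq.mp hj
    rw [List.length_map, List.length_range] at hjlt
    rw [hj]
    simp only [Option.map_some, Option.some_or, Option.getD_some]
    constructor
    · intro _; exact List.contains_iff_mem.mpr h
    · intro _
      simp only [Int.ofNat_eq_natCast]
      omega
  · -- not in the prefix: the first occurrence is k itself
    have hnone : (((List.range k).map f).findIdx? (fun b => b == f k)) = none := by
      rw [List.findIdx?_eq_none_iff]
      intro x hx
      cases hpx : x == f k
      · rfl
      · exact absurd (eq_of_beq hpx ▸ hx) h
    obtain ⟨m, hm⟩ : ∃ m, N - k = m + 1 := ⟨N - k - 1, by omega⟩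
    have hsuf : ((List.map (fun x => k + x) (List.range (N - k))).map f).findIdx?
        (fun b => b == f k) = some 0 := by
      rw [hm, List.range_succ_eq_map]
      simp [List.findIdx?_cons]
    rw [hnone, hsuf]
    simp only [Option.map_some, Option.none_or, Option.getD_some, List.length_map,
      List.length_range, Nat.zero_add]
    constructor
    · intro hlt
      exfalso
      simp only [Int.ofNat_eq_natCast] at hlt
      omega
    · intro hc
      exact absurd (List.contains_iff_mem.mp hc) h

theorem pvBScan_eq_bScanF (f : Nat → String) (N : Nat) :
    ∀ k, k ≤ N →
      pvBScan ((List.range N).map f) (pvBuildFirst ((List.range N).map f)) k = pvBScanF f k := by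
  intro k
  induction k with
  | zero => intro _; rfl
  | succ k ih =>
    intro hk
    have hkN : k < N := hk
    have hget : PySem.List.pyGetD ((List.range N).map f) (k : Int) "" = f k := by
      rw [PySem.List.pyGetD_natCast]
      simp [List.getD, hkN]
    rw [pvBScan, pvBScanF, hget]
    by_cases h : ((List.range k).map f).contains (f k) = true
    · rw [if_pos ((pvCond_iff f N k hkN).mpr h), if_pos h]
    · rw [if_neg (fun hc => h ((pvCond_iff f N k hkN).mp hc)), if_neg h, ih (le_of_lt hkN)]

-- ===== VERDICT (by name: the statement is the Claim_ definition above) =====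
theorem detectIndicatorIndex_spec : Claim_equal_detectIndicatorIndex := by
  intro ciphertext _
  unfold Spec_detectIndicatorIndex detectIndicatorIndex detectIndicatorIndex_alt
  set n : Int := -(PySem.Int.floordiv (-(PySem.Str.len ciphertext)) 16) with hn
  set f : Nat → String := fun k =>
    PySem.Str.slice ciphertext (some (16*(k : Int))) (some (16*((k : Int)+1))) with hf
  simp only [PySem.List.pyRange_one, sub_zero, zero_add, List.foldl_map, List.map_map]
  rw [(pvFoldA_spec f n.toNat).2]
  rw [show ((fun i => PySem.Str.slice ciphertext (some (16*i)) (some (16*(i+1)))) ∘ fun (k : Nat) => (k : Int)) = f from rfl]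
  rw [pvBScan_eq_bScanF f n.toNat n.toNat (le_refl _)]
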